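-- pv_equiv track=rewrite | github.com/zllstr/graphq | entity_linker/test_question.py | combine_wordlist
-- ===== SOURCE A (Python) =====
-- def combine_wordlist(word_list):
--     phrases=list()
--     i=0
--     for i in range(0,len(word_list)):
--         word=word_list[i]
--         phrases.append(word+"###"+str(i)+":"+str(i))
--         for j in range(i+1,len(word_list)):
--             word=word+" "+word_list[j]
--             phrases.append(word+"###"+str(i)+":"+str(j))
--     return phrases
-- ===== SOURCE B (Python) =====
-- def combine_wordlist(word_list):
--     n = len(word_list)
--     return [' '.join(word_list[i:j + 1]) + "###" + str(i) + ":" + str(j)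
--             for i in range(n) for j in range(i, n)]
-- ===== Notes on version B (the rewrite author's own statement) =====
-- stated objective: simpler
-- what changed: Replaces A's nested loops with a mutable running-string accumulator carried across the inner loop by a single flat comprehension that computes each phrase independently as ' '.join(word_list[i:j+1]); no loop-carried string state remains.
import Mathlib
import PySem

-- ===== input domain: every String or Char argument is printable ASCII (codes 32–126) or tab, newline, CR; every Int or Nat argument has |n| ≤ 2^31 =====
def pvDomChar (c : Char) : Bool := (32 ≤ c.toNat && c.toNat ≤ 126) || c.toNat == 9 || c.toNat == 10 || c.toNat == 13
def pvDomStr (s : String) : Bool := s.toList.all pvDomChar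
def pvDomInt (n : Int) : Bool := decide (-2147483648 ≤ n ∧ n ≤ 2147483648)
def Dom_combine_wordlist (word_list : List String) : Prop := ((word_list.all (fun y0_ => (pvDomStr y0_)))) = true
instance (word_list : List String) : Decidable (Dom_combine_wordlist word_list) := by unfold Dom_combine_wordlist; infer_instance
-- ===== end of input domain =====

-- B replaces A's loop-carried running-string accumulator by an independent slice-and-join
-- computation of each phrase (objective: simpler).

-- ===== PORT A =====
-- for i in range(len(ws)): word = ws[i]; append; for j in range(i+1, len(ws)): word += " " + ws[j]; append
def combine_wordlist (word_list : List String) : List String :=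
  (PySem.List.pyRange 0 (word_list.length : Int) 1).foldl
    (fun phrases i =>
      let word := PySem.List.pyGetD word_list i ""
      let phrases := phrases ++ [word ++ "###" ++ PySem.Int.toStr i ++ ":" ++ PySem.Int.toStr i]
      ((PySem.List.pyRange (i + 1) (word_list.length : Int) 1).foldl
        (fun (st : String × List String) j =>
          (st.1 ++ " " ++ PySem.List.pyGetD word_list j "",
           st.2 ++ [st.1 ++ " " ++ PySem.List.pyGetD word_list j "" ++ "###" ++
                    PySem.Int.toStr i ++ ":" ++ PySem.Int.toStr j]))
        (word, phrases)).2)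
    []

-- ===== PORT B =====
-- [' '.join(ws[i:j+1]) + "###" + str(i) + ":" + str(j) for i in range(n) for j in range(i, n)]
def combine_wordlist_alt (word_list : List String) : List String :=
  (PySem.List.pyRange 0 (word_list.length : Int) 1).flatMap (fun i =>
    (PySem.List.pyRange i (word_list.length : Int) 1).map (fun j =>
      PySem.Str.join " " (PySem.List.slice word_list (some i) (some (j + 1))) ++ "###" ++
        PySem.Int.toStr i ++ ":" ++ PySem.Int.toStr j))

-- ===== PRECONDITION & SPEC =====
def Spec_combine_wordlist (word_list : List String) (out : List String) : Prop := out = combine_wordlist_alt word_list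
instance (word_list : List String) (out : List String) : Decidable (Spec_combine_wordlist word_list out) := by unfold Spec_combine_wordlist; infer_instance

-- ===== CLAIM (what is proved, stated in full; the proofs are below) =====
def Claim_equal_combine_wordlist : Prop := ∀ (word_list : List String), Dom_combine_wordlist word_list → Spec_combine_wordlist word_list (combine_wordlist word_list)

-- ===== LEMMAS AND PROOFS =====

-- sep-join of a nonempty list extended by one element, on the Chars side
theorem pv_chars_join_snoc (sep y : List Char) (l : List (List Char)) (h : l ≠ []) :
    PySem.Chars.join sep (l ++ [y]) = PySem.Chars.join sep l ++ sep ++ y := by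
  induction l with
  | nil => exact absurd rfl h
  | cons a l ih =>
    cases l with
    | nil => simp [PySem.Chars.join_cons_cons, PySem.Chars.join_singleton]
    | cons b l' =>
      have h1 : PySem.Chars.join sep ((a :: b :: l') ++ [y]) =
          a ++ sep ++ PySem.Chars.join sep ((b :: l') ++ [y]) := by
        rw [show (a :: b :: l') ++ [y] = a :: b :: (l' ++ [y]) from rfl,
          PySem.Chars.join_cons_cons]
        rfl
      rw [h1, ih (by simp), PySem.Chars.join_cons_cons]
      simp [List.append_assoc]

theorem pv_str_join_snoc (sep y : String) (l : List String) (h : l ≠ []) :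
    PySem.Str.join sep (l ++ [y]) = PySem.Str.join sep l ++ sep ++ y := by
  rw [← String.toList_inj]
  simp only [String.toList_append, PySem.Str.toList_join, List.map_append, List.map_cons,
    List.map_nil]
  exact pv_chars_join_snoc sep.toList y.toList (l.map String.toList) (by simpa using h)

-- ws[i:m+1] = ws[i:m] ++ [ws[m]]  (i ≤ m < len ws)
theorem pv_slice_snoc (ws : List String) (i m : Nat) (him : i ≤ m) (hm : m < ws.length) :
    PySem.List.slice ws (some (i : Int)) (some ((m : Int) + 1)) =
      PySem.List.slice ws (some (i : Int)) (some (m : Int)) ++ [ws.getD m ""] := by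
  have h1 : ((m : Int) + 1) = ((m + 1 : Nat) : Int) := by push_cast; ring
  rw [h1, PySem.List.slice_natCast, PySem.List.slice_natCast]
  have h2 : m + 1 - i = (m - i) + 1 := by omega
  rw [h2, List.take_add_one]
  have h3 : (ws.drop i)[m - i]? = some ws[m] := by
    rw [List.getElem?_drop]
    have : i + (m - i) = m := by omega
    rw [this, List.getElem?_eq_getElem hm]
  rw [h3]
  simp [List.getD_eq_getElem?_getD, List.getElem?_eq_getElem hm]

-- ws[i:i+1] joined is ws[i]
theorem pv_slice_single (ws : List String) (i : Nat) (hi : i < ws.length) :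
    PySem.Str.join " " (PySem.List.slice ws (some (i : Int)) (some ((i : Int) + 1))) =
      PySem.List.pyGetD ws (i : Int) "" := by
  rw [pv_slice_snoc ws i i le_rfl hi, PySem.List.slice_natCast]
  simp [PySem.Str.join, PySem.Chars.join_singleton, PySem.List.pyGetD_natCast]

-- slice-join absorbs one more word (i ≤ m < len ws, slice nonempty since i < m handled via i ≤ m with word appended)
theorem pv_join_step (ws : List String) (i m : Nat) (him : i < m) (hm : m < ws.length) :
    PySem.Str.join " " (PySem.List.slice ws (some (i : Int)) (some (m : Int))) ++ " " ++
        PySem.List.pyGetD ws (m : Int) "" =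
      PySem.Str.join " " (PySem.List.slice ws (some (i : Int)) (some ((m : Int) + 1))) := by
  rw [pv_slice_snoc ws i m (Nat.le_of_lt him) hm]
  rw [pv_str_join_snoc]
  · simp [PySem.List.pyGetD_natCast]
  · rw [PySem.List.slice_natCast]
    have : (ws.drop i).length = ws.length - i := List.length_drop ..
    intro hnil
    have := congrArg List.length hnil
    simp [List.length_take, List.length_drop] at this
    omega

-- the inner j-loop of A computes B's phrases for j = m .. len-1, given the invariant word = join(ws[i:m])
theorem pv_inner (ws : List String) (i : Nat) :
    ∀ (d m : Nat), ws.length - m = d → i < m → m ≤ ws.length → ∀ (acc : List String),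
      ((PySem.List.pyRange (m : Int) (ws.length : Int) 1).foldl
        (fun (st : String × List String) j =>
          (st.1 ++ " " ++ PySem.List.pyGetD ws j "",
           st.2 ++ [st.1 ++ " " ++ PySem.List.pyGetD ws j "" ++ "###" ++
                    PySem.Int.toStr (i : Int) ++ ":" ++ PySem.Int.toStr j]))
        (PySem.Str.join " " (PySem.List.slice ws (some (i : Int)) (some (m : Int))), acc)).2
      = acc ++ (PySem.List.pyRange (m : Int) (ws.length : Int) 1).map (fun j =>
          PySem.Str.join " " (PySem.List.slice ws (some (i : Int)) (some (j + 1))) ++ "###" ++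
            PySem.Int.toStr (i : Int) ++ ":" ++ PySem.Int.toStr j) := by
  intro d
  induction d with
  | zero =>
    intro m hd him hm acc
    have hEq : m = ws.length := by omega
    subst hEq
    rw [PySem.List.pyRange_one_eq_nil le_rfl]
    simp
  | succ d ih =>
    intro m hd him hm acc
    have hlt : m < ws.length := by omega
    have hltI : (m : Int) < (ws.length : Int) := by exact_mod_cast hlt
    rw [PySem.List.pyRange_one_cons hltI]
    simp only [List.foldl_cons, List.map_cons]
    rw [pv_join_step ws i m him hlt]
    have hcast : ((m : Int) + 1) = ((m + 1 : Nat) : Int) := by push_cast; ring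
    rw [hcast] at *
    rw [ih (m + 1) (by omega) (by omega) (by omega)
      (acc ++ [PySem.Str.join " " (PySem.List.slice ws (some (i : Int)) (some ((m + 1 : Nat) : Int))) ++ "###" ++
        PySem.Int.toStr (i : Int) ++ ":" ++ PySem.Int.toStr (m : Int)])]
    simp [List.append_assoc]

-- ===== VERDICT (by name: the statement is the Claim_ definition above) =====
theorem combine_wordlist_spec : Claim_equal_combine_wordlist := by
  intro ws _
  unfold Spec_combine_wordlist combine_wordlist combine_wordlist_alt
  rw [PySem.List.foldl_congr_mem _ _
    (fun phrases i => phrases ++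
      (PySem.List.pyRange i (ws.length : Int) 1).map (fun j =>
        PySem.Str.join " " (PySem.List.slice ws (some i) (some (j + 1))) ++ "###" ++
          PySem.Int.toStr i ++ ":" ++ PySem.Int.toStr j)) []]
  · exact PySem.List.foldl_append_eq_flatMap _ _ []
  · intro acc x hx
    rw [PySem.List.mem_pyRange_one] at hx
    obtain ⟨hx0, hxn⟩ := hx
    obtain ⟨iN, rfl⟩ := Int.eq_ofNat_of_zero_le hx0
    have hiN : iN < ws.length := by exact_mod_cast hxn
    simp only []
    have hfirst : PySem.List.pyGetD ws (iN : Int) "" ++ "###" ++ PySem.Int.toStr (iN : Int) ++ ":" ++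
        PySem.Int.toStr (iN : Int) =
        PySem.Str.join " " (PySem.List.slice ws (some (iN : Int)) (some ((iN : Int) + 1))) ++ "###" ++
        PySem.Int.toStr (iN : Int) ++ ":" ++ PySem.Int.toStr (iN : Int) := by
      rw [pv_slice_single ws iN hiN]
    have hinit : PySem.List.pyGetD ws (iN : Int) "" =
        PySem.Str.join " " (PySem.List.slice ws (some (iN : Int)) (some (((iN + 1 : Nat)) : Int))) := by
      rw [← pv_slice_single ws iN hiN]; norm_cast
    have hcast : ((iN : Int) + 1) = ((iN + 1 : Nat) : Int) := by push_cast; ring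
    rw [hinit]
    rw [show ((iN : Int) + 1) = ((iN + 1 : Nat) : Int) from hcast]
    rw [pv_inner ws iN (ws.length - (iN + 1)) (iN + 1) rfl (by omega) (by omega)]
    rw [show PySem.List.pyRange (iN : Int) (ws.length : Int) 1 =
          (iN : Int) :: PySem.List.pyRange ((iN : Int) + 1) (ws.length : Int) 1 from
        PySem.List.pyRange_one_cons (by exact_mod_cast hiN)]
    simp only [List.map_cons, ← hcast]
    simp [List.append_assoc]
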